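-- pv_equiv track=rewrite | github.com/ansh1113/ovla | ovla/core/semantic_extractor.py | _classify_joint_role
-- ===== SOURCE A (Python) =====
-- def _classify_joint_role(joint_name: str) -> str:
--     """Heuristic joint role classification"""
--     name_lower = joint_name.lower()
--
--     if any(x in name_lower for x in ['wrist', 'hand']):
--         return 'wrist'
--     elif 'elbow' in name_lower:
--         return 'elbow'
--     elif 'shoulder' in name_lower:
--         return 'shoulder'
--     elif 'ankle' in name_lower:
--         return 'ankle'
--     elif 'knee' in name_lower:
--         return 'knee'
--     elif 'hip' in name_lower:
--         return 'hip'
--     elif any(x in name_lower for x in ['waist', 'torso', 'spine', 'pelvis']):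
--         return 'torso'
--     elif any(x in name_lower for x in ['finger', 'gripper']):
--         return 'end_effector'
--
--     return 'other'
-- ===== SOURCE B (Python) =====
-- KEYWORD_ROLE = {
--     'wrist': 'wrist', 'hand': 'wrist',
--     'elbow': 'elbow',
--     'shoulder': 'shoulder',
--     'ankle': 'ankle',
--     'knee': 'knee',
--     'hip': 'hip',
--     'waist': 'torso', 'torso': 'torso', 'spine': 'torso', 'pelvis': 'torso',
--     'finger': 'end_effector', 'gripper': 'end_effector',
-- }
--
-- PRIORITY = ['wrist', 'elbow', 'shoulder', 'ankle', 'knee', 'hip', 'torso', 'end_effector']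
--
--
-- def _classify_joint_role(joint_name: str) -> str:
--     """Heuristic joint role classification: first collect ALL matching roles,
--     then pick the highest-priority one."""
--     name_lower = joint_name.lower()
--     matched = {role for kw, role in KEYWORD_ROLE.items() if kw in name_lower}
--     return next((r for r in PRIORITY if r in matched), 'other')
-- ===== Notes on version B (the rewrite author's own statement) =====
-- stated objective: alternative
-- what changed: Instead of an early-exit if/elif chain of ordered substring tests, B runs two staged passes: it first evaluates ALL keyword tests and collects the full set of matched roles, then selects the highest-priority role from a fixed priority list (falling back to 'other').
import Mathlib
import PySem

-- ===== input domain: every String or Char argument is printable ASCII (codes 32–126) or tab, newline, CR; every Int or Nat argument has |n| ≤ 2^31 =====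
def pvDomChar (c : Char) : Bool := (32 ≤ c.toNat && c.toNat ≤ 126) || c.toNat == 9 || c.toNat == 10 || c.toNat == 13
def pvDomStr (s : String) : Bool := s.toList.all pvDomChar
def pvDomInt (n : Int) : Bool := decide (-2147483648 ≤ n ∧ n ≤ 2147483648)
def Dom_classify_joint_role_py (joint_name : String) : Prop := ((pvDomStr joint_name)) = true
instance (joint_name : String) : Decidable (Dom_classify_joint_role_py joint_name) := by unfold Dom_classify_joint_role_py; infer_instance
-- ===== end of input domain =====

-- B replaces A's early-exit if/elif chain by two staged passes: collect the full set of matched roles, then pick the first role of a fixed priority list (alternative decomposition, same cost).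


-- ===== PORT A =====
def classify_joint_role_py (joint_name : String) : String :=
  let name_lower := PySem.Str.lower joint_name
  if (["wrist", "hand"].any (fun x => PySem.Str.isIn x name_lower)) then "wrist"
  else if PySem.Str.isIn "elbow" name_lower then "elbow"
  else if PySem.Str.isIn "shoulder" name_lower then "shoulder"
  else if PySem.Str.isIn "ankle" name_lower then "ankle"
  else if PySem.Str.isIn "knee" name_lower then "knee"
  else if PySem.Str.isIn "hip" name_lower then "hip"
  else if (["waist", "torso", "spine", "pelvis"].any (fun x => PySem.Str.isIn x name_lower)) then "torso"
  else if (["finger", "gripper"].any (fun x => PySem.Str.isIn x name_lower)) then "end_effector"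
  else "other"

-- ===== PORT B =====
-- KEYWORD_ROLE.items() (dict, literal keys so insertion order is the written order)
def pvKeywordRole : List (String × String) :=
  [("wrist", "wrist"), ("hand", "wrist"),
   ("elbow", "elbow"),
   ("shoulder", "shoulder"),
   ("ankle", "ankle"),
   ("knee", "knee"),
   ("hip", "hip"),
   ("waist", "torso"), ("torso", "torso"), ("spine", "torso"), ("pelvis", "torso"),
   ("finger", "end_effector"), ("gripper", "end_effector")]

def pvPriority : List String :=
  ["wrist", "elbow", "shoulder", "ankle", "knee", "hip", "torso", "end_effector"]

-- next((r for r in PRIORITY if r in matched), 'other')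
def pvFirstIn (matched : PySem.Set String) : List String → String
  | [] => "other"
  | r :: rest => if PySem.Set.contains matched r then r else pvFirstIn matched rest

def classify_joint_role_py_alt (joint_name : String) : String :=
  let name_lower := PySem.Str.lower joint_name
  -- {role for kw, role in KEYWORD_ROLE.items() if kw in name_lower}
  let matched : PySem.Set String :=
    PySem.Set.ofList ((pvKeywordRole.filter (fun p => PySem.Str.isIn p.1 name_lower)).map Prod.snd)
  pvFirstIn matched pvPriority

-- ===== PRECONDITION & SPEC =====
def Spec_classify_joint_role_py (joint_name : String) (out : String) : Prop := out = classify_joint_role_py_alt joint_name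
instance (joint_name : String) (out : String) : Decidable (Spec_classify_joint_role_py joint_name out) := by unfold Spec_classify_joint_role_py; infer_instance

-- ===== CLAIM (what is proved, stated in full; the proofs are below) =====
def Claim_equal_classify_joint_role_py : Prop := ∀ (joint_name : String), Dom_classify_joint_role_py joint_name → Spec_classify_joint_role_py joint_name (classify_joint_role_py joint_name)

-- ===== LEMMAS AND PROOFS =====
-- membership of a role in B's matched set, expressed by the per-keyword containment tests
theorem pv_contains_matched (L : String) (r : String) :
    PySem.Set.contains
      (PySem.Set.ofList ((pvKeywordRole.filter (fun p => PySem.Str.isIn p.1 L)).map Prod.snd)) r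
      = (pvKeywordRole.any (fun p => p.2 == r && PySem.Str.isIn p.1 L)) := by
  rw [Bool.eq_iff_iff]
  simp [PySem.Set.mem_ofList, List.mem_filter, List.mem_map, pvKeywordRole]
  constructor
  · rintro ⟨a, (⟨rfl,rfl⟩|⟨rfl,rfl⟩|⟨rfl,rfl⟩|⟨rfl,rfl⟩|⟨rfl,rfl⟩|⟨rfl,rfl⟩|⟨rfl,rfl⟩|⟨rfl,rfl⟩|⟨rfl,rfl⟩|⟨rfl,rfl⟩|⟨rfl,rfl⟩|⟨rfl,rfl⟩|⟨rfl,rfl⟩), hin⟩ <;>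
      first
      | exact Or.inl ⟨rfl, hin⟩
      | exact Or.inr (Or.inl ⟨rfl, hin⟩)
      | exact Or.inr (Or.inr (Or.inl ⟨rfl, hin⟩))
      | exact Or.inr (Or.inr (Or.inr (Or.inl ⟨rfl, hin⟩)))
      | exact Or.inr (Or.inr (Or.inr (Or.inr (Or.inl ⟨rfl, hin⟩))))
      | exact Or.inr (Or.inr (Or.inr (Or.inr (Or.inr (Or.inl ⟨rfl, hin⟩)))))
      | exact Or.inr (Or.inr (Or.inr (Or.inr (Or.inr (Or.inr (Or.inl ⟨rfl, hin⟩))))))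
      | exact Or.inr (Or.inr (Or.inr (Or.inr (Or.inr (Or.inr (Or.inr (Or.inl ⟨rfl, hin⟩)))))))
      | exact Or.inr (Or.inr (Or.inr (Or.inr (Or.inr (Or.inr (Or.inr (Or.inr (Or.inl ⟨rfl, hin⟩))))))))
      | exact Or.inr (Or.inr (Or.inr (Or.inr (Or.inr (Or.inr (Or.inr (Or.inr (Or.inr (Or.inl ⟨rfl, hin⟩)))))))))
      | exact Or.inr (Or.inr (Or.inr (Or.inr (Or.inr (Or.inr (Or.inr (Or.inr (Or.inr (Or.inr (Or.inl ⟨rfl, hin⟩))))))))))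
      | exact Or.inr (Or.inr (Or.inr (Or.inr (Or.inr (Or.inr (Or.inr (Or.inr (Or.inr (Or.inr (Or.inr (Or.inl ⟨rfl, hin⟩)))))))))))
      | exact Or.inr (Or.inr (Or.inr (Or.inr (Or.inr (Or.inr (Or.inr (Or.inr (Or.inr (Or.inr (Or.inr (Or.inr (⟨rfl, hin⟩))))))))))))
  · rintro (⟨rfl,h⟩|⟨rfl,h⟩|⟨rfl,h⟩|⟨rfl,h⟩|⟨rfl,h⟩|⟨rfl,h⟩|⟨rfl,h⟩|⟨rfl,h⟩|⟨rfl,h⟩|⟨rfl,h⟩|⟨rfl,h⟩|⟨rfl,h⟩|⟨rfl,h⟩)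
    · exact ⟨"wrist", Or.inl ⟨rfl, rfl⟩, h⟩
    · exact ⟨"hand", Or.inr (Or.inl ⟨rfl, rfl⟩), h⟩
    · exact ⟨"elbow", Or.inr (Or.inr (Or.inl ⟨rfl, rfl⟩)), h⟩
    · exact ⟨"shoulder", Or.inr (Or.inr (Or.inr (Or.inl ⟨rfl, rfl⟩))), h⟩
    · exact ⟨"ankle", Or.inr (Or.inr (Or.inr (Or.inr (Or.inl ⟨rfl, rfl⟩)))), h⟩
    · exact ⟨"knee", Or.inr (Or.inr (Or.inr (Or.inr (Or.inr (Or.inl ⟨rfl, rfl⟩))))), h⟩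
    · exact ⟨"hip", Or.inr (Or.inr (Or.inr (Or.inr (Or.inr (Or.inr (Or.inl ⟨rfl, rfl⟩)))))), h⟩
    · exact ⟨"waist", Or.inr (Or.inr (Or.inr (Or.inr (Or.inr (Or.inr (Or.inr (Or.inl ⟨rfl, rfl⟩))))))), h⟩
    · exact ⟨"torso", Or.inr (Or.inr (Or.inr (Or.inr (Or.inr (Or.inr (Or.inr (Or.inr (Or.inl ⟨rfl, rfl⟩)))))))), h⟩
    · exact ⟨"spine", Or.inr (Or.inr (Or.inr (Or.inr (Or.inr (Or.inr (Or.inr (Or.inr (Or.inr (Or.inl ⟨rfl, rfl⟩))))))))), h⟩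
    · exact ⟨"pelvis", Or.inr (Or.inr (Or.inr (Or.inr (Or.inr (Or.inr (Or.inr (Or.inr (Or.inr (Or.inr (Or.inl ⟨rfl, rfl⟩)))))))))), h⟩
    · exact ⟨"finger", Or.inr (Or.inr (Or.inr (Or.inr (Or.inr (Or.inr (Or.inr (Or.inr (Or.inr (Or.inr (Or.inr (Or.inl ⟨rfl, rfl⟩))))))))))), h⟩
    · exact ⟨"gripper", Or.inr (Or.inr (Or.inr (Or.inr (Or.inr (Or.inr (Or.inr (Or.inr (Or.inr (Or.inr (Or.inr (Or.inr (⟨rfl, rfl⟩)))))))))))), h⟩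

-- ===== VERDICT (by name: the statement is the Claim_ definition above) =====
theorem classify_joint_role_py_spec : Claim_equal_classify_joint_role_py := by
  intro j _
  unfold Spec_classify_joint_role_py
  simp only [classify_joint_role_py, classify_joint_role_py_alt, pvPriority, pvFirstIn]
  simp only [pv_contains_matched]
  simp only [pvKeywordRole, List.any_cons, List.any_nil, Bool.or_false]
  simp
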